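-- pv_equiv track=rewrite | github.com/stevoslates/Wordle-Solver-With-Letter-Frequency | Solver.py | suggested_words
-- ===== SOURCE A (Python) =====
-- def suggested_words(words, freq):
--     suggested_words = list()
--     counts = list() #this list is a parallel array so we can see how many of the most common letters appear in the word.
--
--     for i in words:
--         count = 0
--         for j in freq:
--             if j in i:  #if letter in the word then add to its counter
--                 count += 1
--         counts.append(count)
--
--     #lets zip them together
--     zipped = zip(words,counts)
--     zipped = list(zipped)
--
--     #gives us the words thaqt contain the greatest amount of most frequent letters
--     zipped.sort(key=lambda x:x[1],reverse=True)
--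
--     #we want to return 5 suggested words - if our list is less than that however we just return the list.
--     if len(zipped) < 5:
--         for i in range(len(zipped)):
--             suggested_words.append(zipped[i][0])
--     else:
--         for i in range(5):  #can change this to see how many suggetsed you would like
--             suggested_words.append(zipped[i][0])
--
--
--     return suggested_words
-- ===== SOURCE B (Python) =====
-- def suggested_words(words, freq):
--     # bucket (counting) sort by count of frequent letters, descending, stable
--     buckets = [[] for _ in range(len(freq) + 1)]
--     for w in words:
--         c = len([j for j in freq if j in w])
--         buckets[c].append(w)
--     result = []
--     for b in reversed(buckets):
--         result += b
--     return result[:5]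
-- ===== Notes on version B (the rewrite author's own statement) =====
-- stated objective: alternative
-- what changed: Replaces the parallel counts list + zip + stable comparison sort + slice with a bucket (counting) sort: each word is appended to the bucket indexed by its count of frequent letters and the buckets are concatenated from highest to lowest count, keeping the first 5.
import Mathlib
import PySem

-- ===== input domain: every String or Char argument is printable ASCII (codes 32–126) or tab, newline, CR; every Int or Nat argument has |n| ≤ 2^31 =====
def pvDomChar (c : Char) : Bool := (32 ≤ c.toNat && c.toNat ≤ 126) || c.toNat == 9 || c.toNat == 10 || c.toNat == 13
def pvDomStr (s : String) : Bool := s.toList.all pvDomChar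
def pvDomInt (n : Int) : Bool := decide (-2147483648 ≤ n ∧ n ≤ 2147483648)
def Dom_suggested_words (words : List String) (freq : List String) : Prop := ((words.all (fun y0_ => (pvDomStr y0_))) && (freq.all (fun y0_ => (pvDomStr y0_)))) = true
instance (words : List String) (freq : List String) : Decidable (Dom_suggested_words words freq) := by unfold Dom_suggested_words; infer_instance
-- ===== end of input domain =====

-- B replaces A's parallel-array + stable descending sort + slice with a stable bucket
-- (counting) sort over the count values; same return value, no speed claim.

-- ===== PORT A =====
def suggested_words (words : List String) (freq : List String) : List String :=
  let counts : List Int := words.foldl (fun counts i =>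
    counts ++ [freq.foldl (fun count j => if PySem.Str.isIn j i then count + 1 else count) 0]) []
  let zipped : List (String × Int) := List.zip words counts
  let zipped := PySem.List.sorted zipped (fun x => x.2) true
  if PySem.List.len zipped < 5 then
    (PySem.List.pyRange 0 (PySem.List.len zipped)).foldl
      (fun acc i => acc ++ [(PySem.List.pyGetD zipped i ("", 0)).1]) []
  else
    (PySem.List.pyRange 0 5).foldl
      (fun acc i => acc ++ [(PySem.List.pyGetD zipped i ("", 0)).1]) []

-- ===== PORT B =====
def suggested_words_alt (words : List String) (freq : List String) : List String :=
  let buckets : List (List String) :=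
    words.foldl (fun bs w =>
        let c := (freq.filter (fun j => PySem.Str.isIn j w)).length
        bs.set c (bs.getD c [] ++ [w]))
      (List.replicate (freq.length + 1) [])
  (buckets.reverse.foldl (fun acc b => acc ++ b) []).take 5

-- ===== PRECONDITION & SPEC =====
def Spec_suggested_words (words : List String) (freq : List String) (out : List String) : Prop := out = suggested_words_alt words freq
instance (words : List String) (freq : List String) (out : List String) : Decidable (Spec_suggested_words words freq out) := by unfold Spec_suggested_words; infer_instance

-- ===== CLAIM (what is proved, stated in full; the proofs are below) =====
def Claim_equal_suggested_words : Prop := ∀ (words : List String) (freq : List String), Dom_suggested_words words freq → Spec_suggested_words words freq (suggested_words words freq)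

-- ===== LEMMAS AND PROOFS =====

-- how many of the frequent letters occur in w
def pvCnt (freq : List String) (w : String) : Nat :=
  (freq.filter (fun j => PySem.Str.isIn j w)).length

-- the bucket indices, highest first
def pvDesc (n : Nat) : List Nat := (List.range (n + 1)).reverse

lemma pvCnt_le (freq : List String) (w : String) : pvCnt freq w ≤ freq.length :=
  List.length_filter_le _ _

lemma castBeq (a b : Nat) : ((a : Int) == (b : Int)) = (a == b) := by
  by_cases h : a = b <;> simp [h]

lemma insertBy_append_skip {α : Type} (before : α → α → Bool) (x : α) (l r : List α)
    (hl : ∀ y ∈ l, before x y = false) :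
    PySem.List.insertBy before x (l ++ r) = l ++ PySem.List.insertBy before x r := by
  induction l with
  | nil => simp
  | cons y l ih =>
    have hy := hl y (by simp)
    simp only [List.cons_append, PySem.List.insertBy, hy, Bool.false_eq_true, if_false]
    rw [ih (fun z hz => hl z (by simp [hz]))]

lemma insertBy_append_front {α : Type} (before : α → α → Bool) (x : α) (l r : List α)
    (hl : ∀ y ∈ l, before x y = false) (hr : ∀ y ∈ r, before x y = true) :
    PySem.List.insertBy before x (l ++ r) = l ++ x :: r := by
  rw [insertBy_append_skip before x l r hl]
  cases r with
  | nil => simp [PySem.List.insertBy]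
  | cons y ys => simp [PySem.List.insertBy, hr y (by simp)]

lemma insertBy_flatMap_buckets (ks : List Nat) (g : Nat → List (String × Int))
    (p : String × Int) (m : Nat) (hm : p.2 = (m : Int)) (hmem : m ∈ ks)
    (hsort : ks.Pairwise (· > ·))
    (hg : ∀ k ∈ ks, ∀ q ∈ g k, q.2 = (k : Int)) :
    PySem.List.insertBy (fun a b => decide (b.2 < a.2)) p (ks.flatMap g)
      = ks.flatMap (fun k => g k ++ if k = m then [p] else []) := by
  induction ks with
  | nil => cases hmem
  | cons k ks ih =>
    have hhead : ∀ k' ∈ ks, k > k' := (List.pairwise_cons.mp hsort).1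
    simp only [List.flatMap_cons]
    by_cases hk : k = m
    · subst hk
      have hnotin : ∀ k' ∈ ks, k' ≠ k := fun k' h => Nat.ne_of_lt (hhead k' h)
      rw [insertBy_append_front _ p (g k) (ks.flatMap g)
          (fun q hq => by
            have := hg k (by simp) q hq
            simp [this, hm])
          (fun q hq => by
            obtain ⟨k', hk', hqk'⟩ := List.mem_flatMap.mp hq
            have hq2 := hg k' (by simp [hk']) q hqk'
            have : k' < k := hhead k' hk'
            simp only [hq2, hm, decide_eq_true_eq]
            exact_mod_cast this)]
      have : ks.flatMap (fun k' => g k' ++ if k' = k then [p] else []) = ks.flatMap g := by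
        rw [List.flatMap]
        rw [List.flatMap]
        congr 1
        apply List.map_congr_left
        intro k' hk'
        simp [hnotin k' hk']
      simp [this]
    · have hmem' : m ∈ ks := by
        rcases List.mem_cons.mp hmem with h | h
        · exact absurd h.symm hk
        · exact h
      have hkm : m < k := hhead m hmem'
      rw [insertBy_append_skip _ p (g k) (ks.flatMap g)
          (fun q hq => by
            have := hg k (by simp) q hq
            simp only [this, hm, decide_eq_false_iff_not]
            intro hlt
            have : k < m := by exact_mod_cast hlt
            omega)]
      rw [ih hmem' (List.pairwise_cons.mp hsort).2
          (fun k' h q hq => hg k' (by simp [h]) q hq)]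
      simp [hk]

lemma pairwise_pvDesc (n : Nat) : (pvDesc n).Pairwise (· > ·) := by
  rw [pvDesc, List.pairwise_reverse]
  simpa using List.pairwise_lt_range (n := n + 1)

lemma mem_pvDesc {n m : Nat} (h : m ≤ n) : m ∈ pvDesc n := by
  simp [pvDesc, List.mem_range]
  omega

lemma sorted_rev_eq_buckets (freq : List String) (ws : List String) :
    PySem.List.sorted (ws.map (fun w => (w, (pvCnt freq w : Int)))) (fun x => x.2) true
      = (pvDesc freq.length).flatMap
          (fun (k : Nat) => (ws.map (fun w => (w, (pvCnt freq w : Int)))).filter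
            (fun p => p.2 == ((k : Nat) : Int))) := by
  rw [PySem.List.sorted_rev_eq_foldl_insertBy]
  induction ws using List.reverseRecOn with
  | nil => simp
  | append_singleton ws w ih =>
    rw [List.map_append, List.foldl_append, ih]
    simp only [List.map_cons, List.map_nil, List.foldl_cons, List.foldl_nil]
    rw [insertBy_flatMap_buckets (pvDesc freq.length) _ (w, (pvCnt freq w : Int))
        (pvCnt freq w) rfl (mem_pvDesc (pvCnt_le freq w)) (pairwise_pvDesc _)
        (fun k _ q hq => by
          have := List.of_mem_filter hq
          simpa using this)]
    congr 1
    funext k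
    rw [List.filter_append]
    congr 1
    by_cases h : k = pvCnt freq w
    · subst h
      simp [List.filter]
    · have h2 : pvCnt freq w ≠ k := fun e => h e.symm
      have h3 : (pvCnt freq w == k) = false := by simp [h2]
      simp [List.filter, castBeq, h, h3]

lemma counts_eq (words freq : List String) :
    words.foldl (fun counts i =>
      counts ++ [freq.foldl (fun count j => if PySem.Str.isIn j i then count + 1 else count) 0]) []
    = words.map (fun w => (pvCnt freq w : Int)) := by
  rw [PySem.List.foldl_append_singleton_eq_map]
  simp only [List.nil_append]
  apply List.map_congr_left
  intro w _
  rw [PySem.List.foldl_count_if (fun j => PySem.Str.isIn j w) freq 0]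
  simp [pvCnt, List.countP_eq_length_filter]

lemma zip_map_self {α β : Type} (l : List α) (g : α → β) :
    l.zip (l.map g) = l.map (fun a => (a, g a)) := by
  simpa using @List.zip_map' α α β id g l

lemma range_map_pyGetD (xs : List (String × Int)) (m : Nat) (hm : m ≤ xs.length)
    (d : String × Int) :
    (PySem.List.pyRange 0 (m : Int)).map (fun i => PySem.List.pyGetD xs i d) = xs.take m := by
  rw [PySem.List.pyRange_zero_natCast, List.map_map]
  apply List.ext_getElem
  · simp [hm]
  · intro i h1 h2
    simp only [List.getElem_map, List.getElem_range, Function.comp]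
    rw [PySem.List.pyGetD_eq_getElem xs d (by positivity) (by
      have : i < m := by simpa using h1
      simp; omega)]
    simp [List.getElem_take]

lemma A_eq (words freq : List String) :
    suggested_words words freq
      = ((PySem.List.sorted (words.map (fun w => (w, (pvCnt freq w : Int))))
          (fun x => x.2) true).map Prod.fst).take 5 := by
  simp only [suggested_words]
  rw [counts_eq, zip_map_self]
  set zs := PySem.List.sorted (words.map (fun w => (w, (pvCnt freq w : Int)))) (fun x => x.2) true with hzs
  have hlen : PySem.List.len zs = (zs.length : Int) := by simp [PySem.List.len]
  by_cases h : zs.length < 5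
  · rw [if_pos (by rw [hlen]; exact_mod_cast h)]
    rw [PySem.List.foldl_append_singleton_eq_map, List.nil_append, hlen,
      show (fun i => (PySem.List.pyGetD zs i ("", 0)).1)
        = Prod.fst ∘ (fun i => PySem.List.pyGetD zs i ("", 0)) from rfl,
      ← List.map_map, range_map_pyGetD zs zs.length (le_refl _), List.take_length]
    rw [List.take_of_length_le (show (zs.map Prod.fst).length ≤ 5 by simp; omega)]
  · rw [if_neg (by rw [hlen]; intro hc; exact h (by exact_mod_cast hc))]
    rw [PySem.List.foldl_append_singleton_eq_map, List.nil_append,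
      show (fun i => (PySem.List.pyGetD zs i ("", 0)).1)
        = Prod.fst ∘ (fun i => PySem.List.pyGetD zs i ("", 0)) from rfl,
      ← List.map_map,
      show (5 : Int) = ((5 : Nat) : Int) from rfl,
      range_map_pyGetD zs 5 (by omega), List.map_take]

lemma buckets_eq (freq : List String) (ws : List String) :
    ws.foldl (fun bs w =>
        bs.set ((freq.filter (fun j => PySem.Str.isIn j w)).length)
          (bs.getD ((freq.filter (fun j => PySem.Str.isIn j w)).length) [] ++ [w]))
      (List.replicate (freq.length + 1) [])
    = (List.range (freq.length + 1)).map (fun k => ws.filter (fun w => pvCnt freq w == k)) := by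
  induction ws using List.reverseRecOn with
  | nil =>
    simp [List.map_const']
  | append_singleton ws w ih =>
    rw [List.foldl_append, ih]
    simp only [List.foldl_cons, List.foldl_nil]
    have hc : pvCnt freq w < freq.length + 1 := Nat.lt_succ_of_le (pvCnt_le freq w)
    apply List.ext_getElem
    · simp
    · intro i h1 h2
      have hi : i < freq.length + 1 := by simpa using h1
      rw [List.getElem_set]
      have hgetD : ((List.range (freq.length + 1)).map
            (fun k => ws.filter (fun w => pvCnt freq w == k))).getD (pvCnt freq w) []
          = ws.filter (fun w' => pvCnt freq w' == pvCnt freq w) := by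
        rw [List.getD_eq_getElem _ _ (by simpa using hc)]
        simp
      simp only [List.getElem_map, List.getElem_range, List.filter_append]
      rw [show (List.filter (fun j => PySem.Str.isIn j w) freq).length = pvCnt freq w from rfl]
      by_cases hik : pvCnt freq w = i
      · rw [if_pos hik, hgetD, hik]
        simp [List.filter, hik]
      · rw [if_neg hik]
        have hne : (pvCnt freq w == i) = false := by simp [hik]
        simp [List.filter, hne]

lemma B_eq (words freq : List String) :
    suggested_words_alt words freq
      = ((pvDesc freq.length).flatMap
          (fun k => words.filter (fun w => pvCnt freq w == k))).take 5 := by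
  simp only [suggested_words_alt]
  rw [buckets_eq]
  have h := PySem.List.foldl_append_eq_flatMap (fun b : List String => b)
      ((List.map (fun k => words.filter (fun w => pvCnt freq w == k))
        (List.range (freq.length + 1))).reverse) []
  rw [h, List.nil_append, List.flatMap_id', ← List.map_reverse, ← List.flatMap_def]
  rfl

theorem suggested_words_spec_aux (words freq : List String) :
    suggested_words words freq = suggested_words_alt words freq := by
  rw [A_eq, B_eq, sorted_rev_eq_buckets]
  congr 1
  rw [List.map_flatMap]
  congr 1
  funext k
  rw [List.filter_map, List.map_map]
  have h1 : (Prod.fst ∘ fun w => (w, (pvCnt freq w : Int))) = id := rfl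
  rw [h1, List.map_id]
  apply List.filter_congr
  intro w _
  exact castBeq (pvCnt freq w) k

-- ===== VERDICT (by name: the statement is the Claim_ definition above) =====
theorem suggested_words_spec : Claim_equal_suggested_words := by
  intro words freq _
  unfold Spec_suggested_words
  exact suggested_words_spec_aux words freq
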